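-- pv_equiv track=rewrite | github.com/Lorddickenstein/FSLRwithNLP | Application/NLP/Tagger.py | build_letters
-- ===== SOURCE A (Python) =====
-- def is_alpha(letter):
--   """ Checks if the recognized sign belongs to the english alphabet or not. """
--   letters = ['A', 'B', 'C', 'D', 'E',
--              'F', 'G', 'H', 'I', 'J',
--              'K', 'L', 'M', 'N', 'O',
--              'P', 'Q', 'R', 'S', 'T',
--              'U', 'V', 'W', 'X', 'Y',
--              'Z']
--   return True if letter in letters else False
--
-- def build_letters(sentence):
--   """ Groups all the recognized letters to form a word. As long as the next recognized sign is an alphabet, it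
--       will be appended as one word.
--   """
--   index = 0
--   new_sentence = []
--   while index < len(sentence):
--     word = sentence[index].upper()
--
--     # Convert fingerspell into one word
--     if is_alpha(word):
--       lett_index = index
--       lett_concat = ''
--       while lett_index < len(sentence):
--         word = sentence[lett_index].upper()
--         if not is_alpha(word):
--           break
--         lett_concat += word
--         lett_index += 1
--       word = lett_concat
--       index = lett_index - 1
--     new_sentence.append(word)
--     index += 1
--   return new_sentence
-- ===== SOURCE B (Python) =====
-- _LETTERS = frozenset(['A', 'B', 'C', 'D', 'E',
--                       'F', 'G', 'H', 'I', 'J',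
--                       'K', 'L', 'M', 'N', 'O',
--                       'P', 'Q', 'R', 'S', 'T',
--                       'U', 'V', 'W', 'X', 'Y',
--                       'Z'])
--
-- def build_letters(sentence):
--     """One flat pass: buffer consecutive alphabet signs, flush the buffer
--     as a single word when a non-alphabet sign (or the end) is reached."""
--     out = []
--     buf = ''
--     for e in sentence:
--         u = e.upper()
--         if u in _LETTERS:
--             buf += u
--         else:
--             if buf:
--                 out.append(buf)
--                 buf = ''
--             out.append(u)
--     if buf:
--         out.append(buf)
--     return out
-- ===== Notes on version B (the rewrite author's own statement) =====
-- stated objective: faster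
-- what changed: Replaced A's index-driven outer while loop with a nested inner while loop that rescans each alphabetic run by a single flat pass that accumulates consecutive alphabet signs in a buffer and flushes it on a non-alphabet sign or at the end.
import Mathlib
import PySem

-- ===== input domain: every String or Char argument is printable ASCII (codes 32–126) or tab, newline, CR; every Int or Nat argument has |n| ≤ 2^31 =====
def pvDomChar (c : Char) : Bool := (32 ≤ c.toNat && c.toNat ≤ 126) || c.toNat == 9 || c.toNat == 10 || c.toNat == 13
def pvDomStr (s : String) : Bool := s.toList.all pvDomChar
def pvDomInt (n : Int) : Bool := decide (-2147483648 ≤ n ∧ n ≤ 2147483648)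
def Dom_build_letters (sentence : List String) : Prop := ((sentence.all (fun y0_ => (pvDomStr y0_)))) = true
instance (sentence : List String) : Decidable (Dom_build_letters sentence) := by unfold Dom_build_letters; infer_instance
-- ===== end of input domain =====

-- B replaces A's nested rescanning while-loops by one flat buffered pass (measured constant-factor faster).

-- ===== PORT A =====
def pyLetters : List String :=
  ["A", "B", "C", "D", "E", "F", "G", "H", "I", "J", "K", "L", "M",
   "N", "O", "P", "Q", "R", "S", "T", "U", "V", "W", "X", "Y", "Z"]

def is_alpha (letter : String) : Bool :=
  if pyLetters.contains letter then true else false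

-- inner while loop of A: state (lett_index, lett_concat); the fuel argument only makes the
-- loop total (every call supplies fuel = sentence.length, enough for the loop's own exit
-- tests to fire first — the loop body is unchanged)
def blInner (sentence : List String) : Nat → Nat → String → Nat × String
  | 0, lett_index, lett_concat => (lett_index, lett_concat)
  | fuel + 1, lett_index, lett_concat =>
    if h : lett_index < sentence.length then
      let word := PySem.Str.upper sentence[lett_index]
      if is_alpha word = false then (lett_index, lett_concat)
      else blInner sentence fuel (lett_index + 1) (lett_concat ++ word)
    else (lett_index, lett_concat)

-- outer while loop of A (same fuel discipline; index strictly increases each iteration)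
def blOuter (sentence : List String) : Nat → Nat → List String → List String
  | 0, _, new_sentence => new_sentence
  | fuel + 1, index, new_sentence =>
    if h : index < sentence.length then
      let word := PySem.Str.upper sentence[index]
      if is_alpha word then
        -- index = lett_index - 1 then index += 1 (the value is ≥ 1 here, so Nat (-1)+1 is exact)
        let r := blInner sentence sentence.length index ""
        blOuter sentence fuel ((r.1 - 1) + 1) (new_sentence ++ [r.2])
      else
        blOuter sentence fuel (index + 1) (new_sentence ++ [word])
    else new_sentence

def build_letters (sentence : List String) : List String := blOuter sentence sentence.length 0 []

-- ===== PORT B =====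
-- frozenset of the 26 uppercase letters (constant membership test)
def altLetters : List String :=
  ["A", "B", "C", "D", "E", "F", "G", "H", "I", "J", "K", "L", "M",
   "N", "O", "P", "Q", "R", "S", "T", "U", "V", "W", "X", "Y", "Z"]

-- one for-loop iteration of B: state (out, buf)
def blStep (acc : List String × String) (e : String) : List String × String :=
  let u := PySem.Str.upper e
  if altLetters.contains u then (acc.1, acc.2 ++ u)
  else if acc.2 = "" then (acc.1 ++ [u], "")
  else (acc.1 ++ [acc.2] ++ [u], "")

def build_letters_alt (sentence : List String) : List String :=
  let r := sentence.foldl blStep ([], "")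
  if r.2 = "" then r.1 else r.1 ++ [r.2]

-- ===== PRECONDITION & SPEC =====
def Spec_build_letters (sentence : List String) (out : List String) : Prop := out = build_letters_alt sentence
instance (sentence : List String) (out : List String) : Decidable (Spec_build_letters sentence out) := by unfold Spec_build_letters; infer_instance

-- ===== CLAIM (what is proved, stated in full; the proofs are below) =====
def Claim_equal_build_letters : Prop := ∀ (sentence : List String), Dom_build_letters sentence → Spec_build_letters sentence (build_letters sentence)

-- ===== LEMMAS AND PROOFS =====

-- abbreviations used only by the proofs
def pvAlpha (x : String) : Bool := is_alpha (PySem.Str.upper x)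
def pvJoin (c : String) (t : List String) : String :=
  t.foldl (fun s x => s ++ PySem.Str.upper x) c

-- reference function: B's pass written as structural recursion with explicit buffer
def pvG : List String → String → List String
  | [], buf => if buf = "" then [] else [buf]
  | e :: rest, buf =>
    let u := PySem.Str.upper e
    if is_alpha u then pvG rest (buf ++ u)
    else (if buf = "" then [] else [buf]) ++ u :: pvG rest ""

theorem mem_alt_iff (u : String) : u ∈ altLetters ↔ is_alpha u = true := by
  simp [altLetters, is_alpha, pyLetters]

-- B's fold equals the reference function
theorem foldB_eq (l : List String) : ∀ (out : List String) (buf : String),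
    (let r := l.foldl blStep (out, buf); if r.2 = "" then r.1 else r.1 ++ [r.2]) = out ++ pvG l buf := by
  induction l with
  | nil => intro out buf; simp [pvG]; split <;> simp_all
  | cons e rest ih =>
    intro out buf
    simp only [List.foldl_cons, pvG]
    by_cases ha : is_alpha (PySem.Str.upper e) = true
    · rw [show blStep (out, buf) e = (out, buf ++ PySem.Str.upper e) by
        simp [blStep, mem_alt_iff, ha]]
      simp [ih, ha]
    · by_cases hb : buf = ""
      · rw [show blStep (out, buf) e = (out ++ [PySem.Str.upper e], "") by
          simp [blStep, mem_alt_iff, ha, hb]]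
        simp [ih, ha, hb]
      · rw [show blStep (out, buf) e = (out ++ [buf] ++ [PySem.Str.upper e], "") by
          simp [blStep, mem_alt_iff, ha, hb]]
        simp [ih, ha, hb]

-- A's inner loop: with enough fuel it returns the alphabetic run from index i joined onto c
theorem blInner_char (s : List String) : ∀ (fuel i : Nat) (c : String), s.length - i ≤ fuel →
    blInner s fuel i c = (i + ((s.drop i).takeWhile pvAlpha).length, pvJoin c ((s.drop i).takeWhile pvAlpha)) := by
  intro fuel
  induction fuel with
  | zero =>
    intro i c h
    have hle : s.length ≤ i := by omega
    simp [blInner, List.drop_eq_nil_of_le hle, pvJoin]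
  | succ m ih =>
    intro i c h
    by_cases hi : i < s.length
    · rw [blInner]
      have hd : s.drop i = s[i] :: s.drop (i + 1) := List.drop_eq_getElem_cons hi
      by_cases ha : pvAlpha s[i] = true
      · have := ih (i + 1) (c ++ PySem.Str.upper s[i]) (by omega)
        simp only [hd, List.takeWhile_cons, ha]
        simp only [pvAlpha] at ha
        simp [hi, ha, this, pvJoin]
        omega
      · simp only [hd, List.takeWhile_cons, ha]
        simp only [pvAlpha] at ha
        simp [hi, Bool.not_eq_true] at ha ⊢
        simp [ha, pvJoin]
    · rw [blInner]
      have hle : s.length ≤ i := by omega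
      simp [List.drop_eq_nil_of_le hle, hi, pvJoin]

-- running the reference function through an alphabetic prefix accumulates it in the buffer
theorem pvG_run (l : List String) : ∀ (buf : String),
    pvG l buf = pvG (l.dropWhile pvAlpha) (pvJoin buf (l.takeWhile pvAlpha)) := by
  induction l with
  | nil => intro buf; simp [pvJoin]
  | cons e rest ih =>
    intro buf
    by_cases ha : pvAlpha e = true
    · have ha' : is_alpha (PySem.Str.upper e) = true := ha
      simp only [pvG, List.takeWhile_cons, List.dropWhile_cons, ha, ha', if_pos]
      rw [ih]
      simp [pvJoin]
    · have ha' : ¬ is_alpha (PySem.Str.upper e) = true := ha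
      simp [pvG, ha, ha', pvJoin]

theorem pyLetters_len : ∀ x ∈ pyLetters, 1 ≤ x.length := by decide

theorem pvJoin_len (t : List String) : ∀ c : String, c.length ≤ (pvJoin c t).length := by
  induction t with
  | nil => intro c; simp [pvJoin]
  | cons x t' ih =>
    intro c
    have := ih (c ++ PySem.Str.upper x)
    simp only [pvJoin, List.foldl_cons] at *
    simp at this
    omega

theorem pvJoin_ne_empty (e : String) (t : List String) (he : pvAlpha e = true) :
    pvJoin "" (e :: t) ≠ "" := by
  have h1 : 1 ≤ (PySem.Str.upper e).length := by
    have hm : PySem.Str.upper e ∈ pyLetters := by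
      have := he
      simp only [pvAlpha, is_alpha] at this
      split at this
      · next h => simpa using h
      · exact absurd this (by simp)
    exact pyLetters_len _ hm
  have h2 := pvJoin_len t ("" ++ PySem.Str.upper e)
  simp only [pvJoin, List.foldl_cons] at h2 ⊢
  intro hc
  rw [hc] at h2
  have h0 : ("" : String).length = 0 := rfl
  simp only [String.length_append, h0] at h2
  omega

-- flushing a non-empty buffer when the next element (if any) is not alphabetic
theorem pvG_flush (d : List String) (buf : String) (hb : buf ≠ "")
    (hh : ∀ x ∈ d.head?, pvAlpha x = false) : pvG d buf = buf :: pvG d "" := by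
  cases d with
  | nil => simp [pvG, hb]
  | cons x d' =>
    have hx : pvAlpha x = false := hh x (by simp)
    have hx' : ¬ is_alpha (PySem.Str.upper x) = true := by
      simp only [pvAlpha] at hx; simp [hx]
    simp [pvG, hx', hb]

theorem drop_length_takeWhile (p : String → Bool) (l : List String) :
    l.drop (l.takeWhile p).length = l.dropWhile p := by
  induction l with
  | nil => simp
  | cons a l ih => by_cases h : p a <;> simp [h, ih]

theorem head?_dropWhile (p : String → Bool) (l : List String) :
    ∀ x ∈ (l.dropWhile p).head?, p x = false := by
  induction l with
  | nil => simp
  | cons e rest ih =>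
    by_cases hp : p e = true
    · simpa [List.dropWhile_cons, hp] using ih
    · simp only [List.dropWhile_cons]
      simp only [Bool.not_eq_true] at hp
      simp [hp]

-- A's outer loop equals the reference function on the remaining suffix
theorem blOuter_eq (s : List String) : ∀ (fuel i : Nat) (acc : List String), s.length - i ≤ fuel →
    blOuter s fuel i acc = acc ++ pvG (s.drop i) "" := by
  intro fuel
  induction fuel with
  | zero =>
    intro i acc h
    have hle : s.length ≤ i := by omega
    simp [blOuter, List.drop_eq_nil_of_le hle, pvG]
  | succ m ih =>
    intro i acc h
    by_cases hi : i < s.length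
    · have hd : s.drop i = s[i] :: s.drop (i + 1) := List.drop_eq_getElem_cons hi
      rw [blOuter]
      by_cases ha : is_alpha (PySem.Str.upper s[i]) = true
      · have hpa : pvAlpha s[i] = true := ha
        have hc := blInner_char s s.length i "" (by omega)
        set t := (s.drop i).takeWhile pvAlpha with ht
        have htcons : t = s[i] :: ((s.drop (i + 1)).takeWhile pvAlpha) := by
          rw [ht, hd, List.takeWhile_cons, if_pos hpa]
        have htlen : 1 ≤ t.length := by rw [htcons]; simp
        have hidx : (blInner s s.length i "").1 - 1 + 1 = i + t.length := by
          rw [hc]; show i + t.length - 1 + 1 = i + t.length; omega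
        have hdd : s.drop (i + t.length) = (s.drop i).dropWhile pvAlpha := by
          have h1 : s.drop (i + t.length) = (s.drop i).drop t.length := by
            rw [List.drop_drop]
          rw [h1, ht, drop_length_takeWhile]
        have hrec := ih (i + t.length) (acc ++ [(blInner s s.length i "").2]) (by omega)
        have hjr : (blInner s s.length i "").2 = pvJoin "" t := by rw [hc]
        have hflush : pvG (s.drop i) "" = pvJoin "" t :: pvG (s.drop (i + t.length)) "" := by
          rw [pvG_run, ← ht, hdd]
          have hne : pvJoin "" t ≠ "" := by
            rw [htcons]; exact pvJoin_ne_empty _ _ hpa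
          rw [pvG_flush _ _ hne (head?_dropWhile _ _)]
        simp only [hi, dif_pos, ha]
        rw [hidx, hrec, hflush, hjr]
        simp
      · have hrec := ih (i + 1) (acc ++ [PySem.Str.upper s[i]]) (by omega)
        simp only [hi, dif_pos, ha, hrec]
        rw [hd]
        simp only [pvG]
        simp [Bool.not_eq_true] at ha
        simp [ha]
    · rw [blOuter]
      have hle : s.length ≤ i := by omega
      simp [List.drop_eq_nil_of_le hle, hi, pvG]

-- ===== VERDICT (by name: the statement is the Claim_ definition above) =====
theorem build_letters_spec : Claim_equal_build_letters := by
  intro sentence _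
  unfold Spec_build_letters build_letters build_letters_alt
  rw [blOuter_eq sentence sentence.length 0 [] (by omega)]
  have := foldB_eq sentence [] ""
  simp only at this
  rw [this]
  simp
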